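-- pv_equiv track=rewrite | github.com/Kinrokin/KT | KT_PROD_CLEANROOM/tools/operator/cohort0_first_successor_evidence_execution_tranche.py | _require_same_subject_head
-- ===== SOURCE A (Python) =====
-- from typing import Any, Dict, Iterable, List, Optional, Sequence, Tuple
--
-- def _require_same_subject_head(packets: Sequence[Dict[str, Any]]) -> str:
--     heads = {
--         str(packet.get("subject_head", "")).strip()
--         for packet in packets
--         if isinstance(packet, dict) and str(packet.get("subject_head", "")).strip()
--     }
--     if len(heads) != 1:
--         raise RuntimeError("FAIL_CLOSED: expected one same-head authority line")
--     return next(iter(heads))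
-- ===== SOURCE B (Python) =====
-- def _require_same_subject_head(packets):
--     head = None
--     for packet in packets:
--         if not isinstance(packet, dict):
--             continue
--         s = str(packet.get("subject_head", "")).strip()
--         if not s:
--             continue
--         if head is None:
--             head = s
--         elif s != head:
--             raise RuntimeError("FAIL_CLOSED: expected one same-head authority line")
--     if head is None:
--         raise RuntimeError("FAIL_CLOSED: expected one same-head authority line")
--     return head
-- ===== Notes on version B (the rewrite author's own statement) =====
-- stated objective: simpler
-- what changed: Replaces the set-comprehension-then-cardinality-check with a single loop maintaining one scalar head that raises immediately on the first conflicting head.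
import Mathlib
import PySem

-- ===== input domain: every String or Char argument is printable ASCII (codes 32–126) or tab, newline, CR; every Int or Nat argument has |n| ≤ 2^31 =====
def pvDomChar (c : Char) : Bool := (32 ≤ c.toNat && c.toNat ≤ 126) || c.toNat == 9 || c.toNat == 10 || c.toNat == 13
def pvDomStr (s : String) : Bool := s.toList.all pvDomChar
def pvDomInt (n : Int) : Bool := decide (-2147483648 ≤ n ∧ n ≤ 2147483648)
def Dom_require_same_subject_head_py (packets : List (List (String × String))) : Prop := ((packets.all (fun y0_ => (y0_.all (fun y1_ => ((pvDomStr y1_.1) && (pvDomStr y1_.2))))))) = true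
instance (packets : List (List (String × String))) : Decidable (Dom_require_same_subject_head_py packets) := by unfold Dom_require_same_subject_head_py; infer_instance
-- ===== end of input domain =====

-- B replaces A's set comprehension + cardinality check with one scalar-accumulator loop
-- that fails fast on the first conflicting head (objective: simpler).
-- Where the Python raises RuntimeError (zero or two-plus distinct heads) is excluded by Pre_;
-- the ports return "" there as a placeholder.

-- str(packet.get("subject_head", "")).strip() — values are strings, so str() is identity.
def pvHead (p : List (String × String)) : String :=
  PySem.Str.strip (PySem.Dict.getD (PySem.Dict.mk p) "subject_head" "")

-- ===== PORT A =====
def require_same_subject_head_py (packets : List (List (String × String))) : String :=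
  -- set comprehension: fold over packets adding the nonempty stripped heads
  -- (isinstance(packet, dict) is always true under the type convention)
  let heads : PySem.Set String :=
    packets.foldl (fun s p =>
      let v := pvHead p
      if v ≠ "" then PySem.Set.add s v else s) PySem.Set.empty
  if PySem.Set.len heads ≠ 1 then ""     -- raise RuntimeError (excluded by Pre_)
  else heads.headD ""                    -- next(iter(heads)) of a singleton set

-- ===== PORT B =====
def pvAltLoop : List (List (String × String)) → Option String → String
  | [], none => ""        -- raise RuntimeError (excluded by Pre_)
  | [], some h => h
  | p :: rest, acc =>
    let s := pvHead p
    if s = "" then pvAltLoop rest acc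
    else match acc with
      | none => pvAltLoop rest (some s)
      | some h => if s ≠ h then "" else pvAltLoop rest (some h)  -- "" = raise (excluded by Pre_)

def require_same_subject_head_py_alt (packets : List (List (String × String))) : String :=
  pvAltLoop packets none

-- ===== PRECONDITION & SPEC =====
-- the nonempty stripped subject heads of the packets, in order
def pvHeads (packets : List (List (String × String))) : List String :=
  (packets.map pvHead).filter (fun v => v ≠ "")

-- A returns normally exactly when at least one packet has a nonempty stripped
-- subject_head and all such heads agree; everywhere else A raises RuntimeError.
def Pre_require_same_subject_head_py (packets : List (List (String × String))) : Prop :=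
  pvHeads packets ≠ [] ∧ ∀ x ∈ pvHeads packets, x = (pvHeads packets).headD ""
instance (packets : List (List (String × String))) : Decidable (Pre_require_same_subject_head_py packets) := by unfold Pre_require_same_subject_head_py; infer_instance

def pvWitness_require_same_subject_head_py : (List (List (String × String))) :=
  [[("subject_head", "alpha")], [("other", "x"), ("subject_head", " alpha ")]]

def Spec_require_same_subject_head_py (packets : List (List (String × String))) (out : String) : Prop := out = require_same_subject_head_py_alt packets
instance (packets : List (List (String × String))) (out : String) : Decidable (Spec_require_same_subject_head_py packets out) := by unfold Spec_require_same_subject_head_py; infer_instance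

-- ===== CLAIM (what is proved, stated in full; the proofs are below) =====
def Claim_equal_require_same_subject_head_py : Prop := ∀ (packets : List (List (String × String))), Dom_require_same_subject_head_py packets → Pre_require_same_subject_head_py packets → Spec_require_same_subject_head_py packets (require_same_subject_head_py packets)

-- ===== LEMMAS AND PROOFS =====

theorem pvHeads_cons_skip (p : List (String × String)) (rest : List (List (String × String)))
    (hv : pvHead p = "") : pvHeads (p :: rest) = pvHeads rest := by
  simp [pvHeads, hv]

theorem pvHeads_cons_keep (p : List (String × String)) (rest : List (List (String × String)))
    (hv : pvHead p ≠ "") : pvHeads (p :: rest) = pvHead p :: pvHeads rest := by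
  simp [pvHeads, hv]

-- A's conditional fold over the packets is the plain Set fold over pvHeads
theorem pvA_fold_eq (l : List (List (String × String))) (s : PySem.Set String) :
    l.foldl (fun s p => let v := pvHead p; if v ≠ "" then PySem.Set.add s v else s) s
      = (pvHeads l).foldl PySem.Set.add s := by
  induction l generalizing s with
  | nil => rfl
  | cons p rest ih =>
    by_cases hv : pvHead p = ""
    · show List.foldl _ (if pvHead p ≠ "" then PySem.Set.add s (pvHead p) else s) rest = _
      rw [if_neg (not_not_intro hv), pvHeads_cons_skip p rest hv]
      exact ih s
    · show List.foldl _ (if pvHead p ≠ "" then PySem.Set.add s (pvHead p) else s) rest = _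
      rw [if_pos hv, pvHeads_cons_keep p rest hv, List.foldl_cons]
      exact ih _

theorem pvFold_add_const (h : String) (xs : List String) (hall : ∀ x ∈ xs, x = h) :
    xs.foldl PySem.Set.add [h] = [h] := by
  induction xs with
  | nil => rfl
  | cons x rest ih =>
    have hx : x = h := hall x (by simp)
    simp only [List.foldl_cons, hx]
    have hadd : PySem.Set.add [h] h = [h] := by simp [PySem.Set.add, PySem.Set.contains]
    rw [hadd]
    exact ih (fun y hy => hall y (by simp [hy]))

theorem pvAltLoop_const (h : String) (l : List (List (String × String)))
    (hall : ∀ x ∈ pvHeads l, x = h) : pvAltLoop l (some h) = h := by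
  induction l with
  | nil => rfl
  | cons p rest ih =>
    show (if pvHead p = "" then pvAltLoop rest (some h)
          else if pvHead p ≠ h then "" else pvAltLoop rest (some h)) = h
    by_cases hv : pvHead p = ""
    · rw [if_pos hv]
      exact ih (fun y hy => hall y (by rw [pvHeads_cons_skip p rest hv]; exact hy))
    · have hph : pvHead p = h := hall _ (by rw [pvHeads_cons_keep p rest hv]; simp)
      rw [if_neg hv, hph, if_neg (not_not_intro rfl)]
      exact ih (fun y hy => hall y (by rw [pvHeads_cons_keep p rest hv]; exact List.mem_cons_of_mem _ hy))

theorem pvAltLoop_none (h : String) (l : List (List (String × String)))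
    (hne : pvHeads l ≠ []) (hall : ∀ x ∈ pvHeads l, x = h) : pvAltLoop l none = h := by
  induction l with
  | nil => exact absurd rfl hne
  | cons p rest ih =>
    show (if pvHead p = "" then pvAltLoop rest none
          else pvAltLoop rest (some (pvHead p))) = h
    by_cases hv : pvHead p = ""
    · rw [if_pos hv]
      exact ih (by rw [← pvHeads_cons_skip p rest hv]; exact hne)
        (fun y hy => hall y (by rw [pvHeads_cons_skip p rest hv]; exact hy))
    · have hph : pvHead p = h := hall _ (by rw [pvHeads_cons_keep p rest hv]; simp)
      rw [if_neg hv, hph]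
      exact pvAltLoop_const h rest (fun y hy => hall y
        (by rw [pvHeads_cons_keep p rest hv]; exact List.mem_cons_of_mem _ hy))

-- ===== VERDICT (by name: the statement is the Claim_ definition above) =====
theorem require_same_subject_head_py_spec : Claim_equal_require_same_subject_head_py := by
  intro packets _ hpre
  obtain ⟨hne, hall⟩ := hpre
  unfold Spec_require_same_subject_head_py require_same_subject_head_py require_same_subject_head_py_alt
  obtain ⟨h, tl, hhs⟩ : ∃ h tl, pvHeads packets = h :: tl := by
    cases hh : pvHeads packets with
    | nil => exact absurd hh hne
    | cons a b => exact ⟨a, b, rfl⟩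
  have hhd : (pvHeads packets).headD "" = h := by rw [hhs]; rfl
  have hall' : ∀ x ∈ pvHeads packets, x = h := fun x hx => (hall x hx).trans hhd
  have hA : packets.foldl (fun s p => let v := pvHead p; if v ≠ "" then PySem.Set.add s v else s)
      PySem.Set.empty = [h] := by
    rw [pvA_fold_eq, hhs, List.foldl_cons]
    have hadd : PySem.Set.add PySem.Set.empty h = [h] := rfl
    rw [hadd]
    exact pvFold_add_const h tl (fun y hy => hall' y (by rw [hhs]; exact List.mem_cons_of_mem _ hy))
  have hB : pvAltLoop packets none = h := pvAltLoop_none h packets hne hall'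
  simp only [hA, hB, PySem.Set.len]
  norm_num
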